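-- pv_equiv track=rewrite | github.com/kickpo49/Algorithm-Study | 프로그래머스/0/181890. 왼쪽 오른쪽/왼쪽 오른쪽.py | solution
-- ===== SOURCE A (Python) =====
-- def solution(str_list):
--     answer = []
--
--     # "l"과 "r"의 인덱스를 각각 찾기 (-1은 존재하지 않음을 의미)
--     l_index = -1
--     r_index = -1
--
--     for i, s in enumerate(str_list):
--         if s == "l" and l_index == -1:  # 처음 등장하는 "l"의 인덱스 저장
--             l_index = i
--         if s == "r" and r_index == -1:  # 처음 등장하는 "r"의 인덱스 저장
--             r_index = i
--
--     # "l"도 "r"도 없는 경우 → 빈 리스트 반환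
--     if l_index == -1 and r_index == -1:
--         return []
--
--     # "r"은 없고 "l"만 있는 경우 → "l" 기준 왼쪽
--     if r_index == -1:
--         return str_list[:l_index]
--
--     # "l"은 없고 "r"만 있는 경우 → "r" 기준 오른쪽
--     if l_index == -1:
--         return str_list[r_index + 1:]
--
--     # 둘 다 있는 경우 → 먼저 나오는 쪽 기준으로 처리
--     if l_index < r_index:
--         # "l"이 먼저 등장 → "l" 기준 왼쪽 (l_index 미포함)
--         answer = str_list[:l_index]
--     else:
--         # "r"이 먼저 등장 → "r" 기준 오른쪽 (r_index 미포함)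
--         answer = str_list[r_index + 1:]
--
--     return answer
-- ===== SOURCE B (Python) =====
-- def solution(str_list):
--     for i, s in enumerate(str_list):
--         if s == "l":
--             return str_list[:i]
--         if s == "r":
--             return str_list[i + 1:]
--     return []
-- ===== Notes on version B (the rewrite author's own statement) =====
-- stated objective: simpler
-- what changed: Replaces the full two-index scan plus four-way post-loop branch cascade with one early-returning pass that slices at the first 'l' or 'r' it meets, maintaining no index variables.
import Mathlib
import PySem

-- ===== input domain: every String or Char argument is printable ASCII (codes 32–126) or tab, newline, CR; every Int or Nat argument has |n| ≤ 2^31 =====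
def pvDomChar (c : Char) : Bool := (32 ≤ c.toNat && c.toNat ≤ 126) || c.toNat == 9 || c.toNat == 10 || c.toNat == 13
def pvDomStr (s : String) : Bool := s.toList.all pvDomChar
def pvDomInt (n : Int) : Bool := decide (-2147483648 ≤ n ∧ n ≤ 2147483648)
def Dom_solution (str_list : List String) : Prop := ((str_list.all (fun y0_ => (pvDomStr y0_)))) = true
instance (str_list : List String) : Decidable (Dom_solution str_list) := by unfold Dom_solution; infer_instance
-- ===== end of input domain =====

-- B replaces A's full two-index scan plus four-way branch cascade by one early-returning
-- pass that slices at the first "l" or "r" encountered (objective: simpler).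

-- ===== PORT A =====
-- A's for-loop over enumerate(str_list), recording first "l" / first "r" indices (-1 = absent)
def solutionLoopA : List String → Nat → Int → Int → Int × Int
  | [], _, l, r => (l, r)
  | s :: rest, i, l, r =>
      let l' := if s = "l" ∧ l = -1 then (i : Int) else l
      let r' := if s = "r" ∧ r = -1 then (i : Int) else r
      solutionLoopA rest (i + 1) l' r'

def solution (str_list : List String) : List String :=
  let p := solutionLoopA str_list 0 (-1) (-1)
  let l_index := p.1
  let r_index := p.2
  if l_index = -1 ∧ r_index = -1 then []
  else if r_index = -1 then PySem.List.slice str_list none (some l_index)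
  else if l_index = -1 then PySem.List.slice str_list (some (r_index + 1)) none
  else if l_index < r_index then PySem.List.slice str_list none (some l_index)
  else PySem.List.slice str_list (some (r_index + 1)) none

-- ===== PORT B =====
-- B's single early-returning loop over enumerate(str_list)
def solutionLoopB (str_list : List String) : List (Int × String) → List String
  | [] => []
  | (i, s) :: rest =>
      if s = "l" then PySem.List.slice str_list none (some i)
      else if s = "r" then PySem.List.slice str_list (some (i + 1)) none
      else solutionLoopB str_list rest

def solution_alt (str_list : List String) : List String :=
  solutionLoopB str_list (PySem.List.enumerate str_list 0)

-- ===== PRECONDITION & SPEC =====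
def Spec_solution (str_list : List String) (out : List String) : Prop := out = solution_alt str_list
instance (str_list : List String) (out : List String) : Decidable (Spec_solution str_list out) := by unfold Spec_solution; infer_instance

-- ===== CLAIM (what is proved, stated in full; the proofs are below) =====
def Claim_equal_solution : Prop := ∀ (str_list : List String), Dom_solution str_list → Spec_solution str_list (solution str_list)

-- ===== LEMMAS AND PROOFS =====

-- first index of "l" (structurally), and of "r"
def flIdx : List String → Option Nat
  | [] => none
  | x :: xs => if x = "l" then some 0 else (flIdx xs).map (· + 1)

def frIdx : List String → Option Nat
  | [] => none
  | x :: xs => if x = "r" then some 0 else (frIdx xs).map (· + 1)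

def encIdx (i : Nat) : Option Nat → Int
  | none => -1
  | some j => (i : Int) + j

lemma loopA_eq (xs : List String) : ∀ (i : Nat) (l r : Int),
    solutionLoopA xs i l r =
      ((if l = -1 then encIdx i (flIdx xs) else l),
       (if r = -1 then encIdx i (frIdx xs) else r)) := by
  induction xs with
  | nil => intro i l r; simp [solutionLoopA, flIdx, frIdx, encIdx]
  | cons s rest ih =>
      intro i l r
      simp only [solutionLoopA, ih, flIdx, frIdx, Prod.mk.injEq]
      have hne : ((i : Nat) : Int) ≠ -1 := by omega
      refine ⟨?_, ?_⟩
      · by_cases hs : s = "l"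
        · by_cases hl : l = -1
          · simp [hs, hl, hne, encIdx]
          · simp [hs, hl]
        · by_cases hl : l = -1
          · simp only [hs, hl, false_and, if_false, if_pos rfl, if_true, if_neg (fun h => hs h)]
            cases h : flIdx rest with
            | none => simp [encIdx]
            | some j => simp [encIdx]; push_cast; ring
          · simp [hs, hl]
      · by_cases hs : s = "r"
        · by_cases hr : r = -1
          · simp [hs, hr, hne, encIdx]
          · simp [hs, hr]
        · by_cases hr : r = -1
          · simp only [hs, hr, false_and, if_false, if_pos rfl, if_true, if_neg (fun h => hs h)]
            cases h : frIdx rest with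
            | none => simp [encIdx]
            | some j => simp [encIdx]; push_cast; ring
          · simp [hs, hr]

-- first "l"-or-"r" marker: index and whether it is "l"
def fmIdx : List String → Option (Nat × Bool)
  | [] => none
  | x :: xs =>
      if x = "l" then some (0, true)
      else if x = "r" then some (0, false)
      else (fmIdx xs).map (fun p => (p.1 + 1, p.2))

lemma loopB_eq (full : List String) (xs : List String) : ∀ (i : Nat),
    solutionLoopB full (PySem.List.enumerate xs (i : Int)) =
      (match fmIdx xs with
       | none => []
       | some (j, true) => PySem.List.slice full none (some ((i + j : Nat) : Int))
       | some (j, false) => PySem.List.slice full (some (((i + j : Nat) : Int) + 1)) none) := by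
  induction xs with
  | nil => intro i; simp [PySem.List.enumerate_nil, solutionLoopB, fmIdx]
  | cons s rest ih =>
      intro i
      rw [PySem.List.enumerate_cons]
      simp only [solutionLoopB, fmIdx]
      by_cases hs : s = "l"
      · simp [hs]
      · by_cases hr : s = "r"
        · simp [hs, hr]
        · have : ((i : Int) + 1) = ((i + 1 : Nat) : Int) := by push_cast; ring
          rw [this, ih (i + 1)]
          simp only [hs, hr, if_neg, if_false]
          cases h : fmIdx rest with
          | none => simp [h]
          | some p =>
              obtain ⟨j, b⟩ := p
              have harith : i + 1 + j = i + (j + 1) := by omega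
              cases b <;> simp [h, harith]

def combineIdx : Option Nat → Option Nat → Option (Nat × Bool)
  | none, none => none
  | some a, none => some (a, true)
  | none, some b => some (b, false)
  | some a, some b => if a ≤ b then some (a, true) else some (b, false)

lemma fm_eq_combine (xs : List String) : fmIdx xs = combineIdx (flIdx xs) (frIdx xs) := by
  induction xs with
  | nil => simp [fmIdx, flIdx, frIdx, combineIdx]
  | cons s rest ih =>
      by_cases hl : s = "l"
      · have hr : s ≠ "r" := by simp [hl]
        simp only [fmIdx, flIdx, frIdx, hl, if_true, if_pos rfl, if_neg hr]
        cases h : frIdx rest with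
        | none => simp [combineIdx]
        | some b => simp [combineIdx]
      · by_cases hr : s = "r"
        · simp only [fmIdx, flIdx, frIdx, hl, hr, if_neg hl, if_pos rfl, if_false, if_true]
          cases h : flIdx rest with
          | none => simp [combineIdx]
          | some a => simp [combineIdx]
        · simp only [fmIdx, flIdx, frIdx, if_neg hl, if_neg hr, ih]
          cases h1 : flIdx rest with
          | none => cases h2 : frIdx rest <;> simp [combineIdx]
          | some a =>
              cases h2 : frIdx rest with
              | none => simp [combineIdx]
              | some b =>
                  by_cases hab : a ≤ b
                  · simp [combineIdx, if_pos hab, if_pos (by omega : a + 1 ≤ b + 1)]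
                  · simp [combineIdx, if_neg hab, if_neg (by omega : ¬ a + 1 ≤ b + 1)]

lemma fl_ne_fr (xs : List String) : ∀ a b, flIdx xs = some a → frIdx xs = some b → a ≠ b := by
  induction xs with
  | nil => intro a b h; simp [flIdx] at h
  | cons s rest ih =>
      intro a b ha hb
      by_cases hl : s = "l"
      · have hr : s ≠ "r" := by simp [hl]
        simp [flIdx, hl] at ha
        simp [frIdx, hr] at hb
        obtain ⟨b', _, hb'⟩ := hb
        omega
      · by_cases hr : s = "r"
        · simp [flIdx, hl] at ha
          simp [frIdx, hr] at hb
          obtain ⟨a', _, ha'⟩ := ha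
          omega
        · simp [flIdx, hl] at ha
          simp [frIdx, hr] at hb
          obtain ⟨a', ha1, ha2⟩ := ha
          obtain ⟨b', hb1, hb2⟩ := hb
          have := ih a' b' ha1 hb1
          omega

-- ===== VERDICT (by name: the statement is the Claim_ definition above) =====
theorem solution_spec : Claim_equal_solution := by
  intro xs _
  unfold Spec_solution solution solution_alt
  have h0 : ((0 : Nat) : Int) = (0 : Int) := rfl
  rw [← h0, loopB_eq xs xs 0, loopA_eq xs 0 (-1) (-1), fm_eq_combine]
  cases hl : flIdx xs with
  | none =>
      cases hr : frIdx xs with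
      | none => simp [combineIdx, encIdx]
      | some b => simp [combineIdx, encIdx]
  | some a =>
      cases hr : frIdx xs with
      | none => simp [combineIdx, encIdx]
      | some b =>
          have hne := fl_ne_fr xs a b hl hr
          simp only [combineIdx, encIdx]
          by_cases hab : a ≤ b
          · simp [hab]
            intro h; exact absurd h (by omega)
          · simp [hab]
            intro h; exact absurd h (by omega)
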